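-- pv_equiv track=rewrite | github.com/EleonoraAI/symbolApp | function/contour_detection.py | group_colors_by_range
-- ===== SOURCE A (Python) =====
-- def group_colors_by_range(colors, range_val=25):
--     grouped_colors = {}
--     for color in colors:
--         found = False
--         for key in grouped_colors.keys():
--             if all(abs(color[i] - key[i]) <= range_val for i in range(3)):
--                 grouped_colors[key] += 1
--                 found = True
--                 break
--         if not found:
--             grouped_colors[color] = 1
--     return grouped_colors
-- ===== SOURCE B (Python) =====
-- def group_colors_by_range(colors, range_val=25):
--     # Spatial hash grid: cell size range_val+1, so any key within range_val of a
--     # color lies in one of the 27 neighbouring cells; the earliest-inserted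
--     # matching key is the one A's scan would have found first.
--     m = range_val + 1 if range_val >= 0 else 1
--     grid = {}    # cell -> list of (insertion index, key)
--     groups = {}  # key -> count (insertion order = A's)
--     n = 0
--     for color in colors:
--         cx, cy, cz = color[0] // m, color[1] // m, color[2] // m
--         best = None
--         for dx in (-1, 0, 1):
--             for dy in (-1, 0, 1):
--                 for dz in (-1, 0, 1):
--                     for idx, key in grid.get((cx + dx, cy + dy, cz + dz), ()):
--                         if (best is None or idx < best[0]) and \
--                            all(abs(color[i] - key[i]) <= range_val for i in range(3)):
--                             best = (idx, key)
--         if best is not None: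
--             groups[best[1]] += 1
--         else:
--             groups[color] = 1
--             grid.setdefault((cx, cy, cz), []).append((n, color))
--             n += 1
--     return groups
-- ===== Notes on version B (the rewrite author's own statement) =====
-- stated objective: alternative
-- what changed: Replaces A's linear scan of all existing group keys per color with a spatial hash grid of cell size range_val+1: candidate keys are read from the 27 neighbouring cells only and the earliest-inserted matching key is selected.
-- outside the precondition, e.g. on group_colors_by_range([(5,), (1000,)], 1): A returns {(5,): 1, (1000,): 1}, B raises IndexError
import Mathlib
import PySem

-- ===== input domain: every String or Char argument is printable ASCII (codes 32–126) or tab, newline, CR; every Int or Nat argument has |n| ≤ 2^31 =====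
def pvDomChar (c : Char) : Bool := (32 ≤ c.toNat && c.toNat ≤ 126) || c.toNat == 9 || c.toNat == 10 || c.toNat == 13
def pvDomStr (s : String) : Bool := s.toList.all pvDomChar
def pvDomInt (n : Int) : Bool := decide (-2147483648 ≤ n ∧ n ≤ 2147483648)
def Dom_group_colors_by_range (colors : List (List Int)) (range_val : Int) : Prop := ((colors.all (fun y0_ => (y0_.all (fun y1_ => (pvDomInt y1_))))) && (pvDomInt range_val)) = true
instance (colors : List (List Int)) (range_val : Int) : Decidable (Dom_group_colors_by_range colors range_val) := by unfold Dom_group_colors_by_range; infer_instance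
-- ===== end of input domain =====

-- B replaces A's per-color linear scan over all existing group keys with a spatial hash
-- grid (cell size range_val+1): only the 27 neighbouring cells can hold a matching key,
-- and the earliest-inserted match is chosen (an alternative algorithm, same result).


-- ===== PORT A =====
-- the predicate 'all(abs(color[i] - key[i]) <= range_val for i in range(3))' shared by
-- both Pythons verbatim; indexing is total via getD, exact on Pre_ (all lengths ≥ 3)
def pvClose (r : Int) (c k : List Int) : Bool :=
  (List.range 3).all (fun i => decide (|c.getD i 0 - k.getD i 0| ≤ r))

-- 'for key in grouped_colors.keys(): if …: …; break'
def aFindKey (r : Int) (c : List Int) : List (List Int) → Option (List Int)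
  | [] => none
  | k :: ks => if pvClose r c k then some k else aFindKey r c ks

-- 'grouped_colors[key] += 1' on the association list (key is present)
def dictBump : List (List Int × Int) → List Int → List (List Int × Int)
  | [], _ => []
  | (k, v) :: rest, key => if k = key then (k, v + 1) :: rest else (k, v) :: dictBump rest key

-- 'grouped_colors[color] = 1' (overwrite in place, new keys append)
def dictSet : List (List Int × Int) → List Int → Int → List (List Int × Int)
  | [], key, v => [(key, v)]
  | (k, w) :: rest, key, v => if k = key then (k, v) :: rest else (k, w) :: dictSet rest key v

def group_colors_by_range (colors : List (List Int)) (range_val : Int) : List (List Int × Int) :=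
  colors.foldl (fun d color =>
    match aFindKey range_val color (d.map Prod.fst) with
    | some key => dictBump d key
    | none => dictSet d color 1) []

-- ===== PORT B =====
def cellOf (m : Int) (c : List Int) : Int × Int × Int :=
  (PySem.Int.floordiv (c.getD 0 0) m, PySem.Int.floordiv (c.getD 1 0) m,
   PySem.Int.floordiv (c.getD 2 0) m)

-- 'if (best is None or idx < best[0]) and all(…): best = (idx, key)'
def bUpd (r : Int) (c : List Int) (best : Option (Int × List Int)) (e : Int × List Int) :
    Option (Int × List Int) :=
  if ((match best with | none => true | some b => decide (e.1 < b.1)) && pvClose r c e.2) then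
    some e
  else best

def bOffs : List Int := [-1, 0, 1]

-- one iteration of B's main loop; state = (grid, groups, n)
def bStep (r m : Int)
    (s : PySem.Dict (Int × Int × Int) (List (Int × List Int)) × List (List Int × Int) × Int)
    (color : List Int) :
    PySem.Dict (Int × Int × Int) (List (Int × List Int)) × List (List Int × Int) × Int :=
  let grid := s.1
  let cc := cellOf m color
  let best := bOffs.foldl (fun b1 dx => bOffs.foldl (fun b2 dy => bOffs.foldl (fun b3 dz =>
      (grid.getD (cc.1 + dx, cc.2.1 + dy, cc.2.2 + dz) []).foldl (bUpd r color) b3) b2) b1)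
    none
  match best with
  | some b => (grid, dictBump s.2.1 b.2, s.2.2)
  | none =>
      (grid.insert cc (grid.getD cc [] ++ [(s.2.2, color)]),
       dictSet s.2.1 color 1, s.2.2 + 1)

def group_colors_by_range_alt (colors : List (List Int)) (range_val : Int) :
    List (List Int × Int) :=
  let m := if 0 ≤ range_val then range_val + 1 else 1
  (colors.foldl (bStep range_val m) (PySem.Dict.empty, [], 0)).2.1

-- ===== PRECONDITION & SPEC =====
-- Pre_ excludes colors shorter than 3 components: there both Pythons generally raise
-- IndexError on 'color[i]' (A can still return when an earlier component already
-- mismatches, an accident of all()'s laziness; B indexes all three eagerly and raises).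
def Pre_group_colors_by_range (colors : List (List Int)) (range_val : Int) : Prop :=
  ∀ c ∈ colors, 3 ≤ c.length
instance (colors : List (List Int)) (range_val : Int) : Decidable (Pre_group_colors_by_range colors range_val) := by unfold Pre_group_colors_by_range; infer_instance

def pvWitness_group_colors_by_range : List (List Int) × Int :=
  ([[0, 0, 0], [1, 2, 3], [100, 100, 100], [90, 100, 110]], 25)

def Spec_group_colors_by_range (colors : List (List Int)) (range_val : Int) (out : List (List Int × Int)) : Prop := out = group_colors_by_range_alt colors range_val
instance (colors : List (List Int)) (range_val : Int) (out : List (List Int × Int)) : Decidable (Spec_group_colors_by_range colors range_val out) := by unfold Spec_group_colors_by_range; infer_instance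

-- ===== CLAIM (what is proved, stated in full; the proofs are below) =====
def Claim_equal_group_colors_by_range : Prop := ∀ (colors : List (List Int)) (range_val : Int), Dom_group_colors_by_range colors range_val → Pre_group_colors_by_range colors range_val → Spec_group_colors_by_range colors range_val (group_colors_by_range colors range_val)

-- ===== LEMMAS AND PROOFS =====

-- A's fold body, named for the proofs
def aStepF (r : Int) (d : List (List Int × Int)) (color : List Int) : List (List Int × Int) :=
  match aFindKey r color (d.map Prod.fst) with
  | some key => dictBump d key
  | none => dictSet d color 1

lemma group_colors_eq_foldl (colors : List (List Int)) (r : Int) :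
    group_colors_by_range colors r = colors.foldl (aStepF r) [] := rfl

-- keys of d, indexed from j in insertion order
def keysIdxFrom (j : Int) : List (List Int) → List (Int × List Int)
  | [] => []
  | k :: ks => (j, k) :: keysIdxFrom (j + 1) ks

lemma mem_keysIdxFrom_ge {e : Int × List Int} : ∀ {j : Int} {ks : List (List Int)},
    e ∈ keysIdxFrom j ks → j ≤ e.1 := by
  intro j ks
  induction ks generalizing j with
  | nil => intro h; simp [keysIdxFrom] at h
  | cons k ks ih =>
    intro h
    simp only [keysIdxFrom, List.mem_cons] at h
    rcases h with h | h
    · subst h; simp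
    · have := ih h; omega

lemma keysIdxFrom_inj {e e' : Int × List Int} : ∀ {j : Int} {ks : List (List Int)},
    e ∈ keysIdxFrom j ks → e' ∈ keysIdxFrom j ks → e.1 = e'.1 → e = e' := by
  intro j ks
  induction ks generalizing j with
  | nil => intro h; simp [keysIdxFrom] at h
  | cons k ks ih =>
    intro h h' heq
    simp only [keysIdxFrom, List.mem_cons] at h h'
    rcases h with h | h <;> rcases h' with h' | h'
    · rw [h, h']
    · exfalso; have := mem_keysIdxFrom_ge h'; subst h; simp at heq; omega
    · exfalso; have := mem_keysIdxFrom_ge h; subst h'; simp at heq; omega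
    · exact ih h h' heq

lemma keysIdxFrom_append_singleton (c : List Int) : ∀ (j : Int) (ks : List (List Int)),
    keysIdxFrom j (ks ++ [c]) = keysIdxFrom j ks ++ [(j + ks.length, c)] := by
  intro j ks
  induction ks generalizing j with
  | nil => simp [keysIdxFrom]
  | cons k ks ih =>
    simp only [List.cons_append, keysIdxFrom, ih, List.length_cons]
    push_cast
    ring_nf

lemma exists_keysIdxFrom_of_mem {k : List Int} : ∀ {j : Int} {ks : List (List Int)},
    k ∈ ks → ∃ i, (i, k) ∈ keysIdxFrom j ks := by
  intro j ks
  induction ks generalizing j with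
  | nil => intro h; simp at h
  | cons k' ks ih =>
    intro h
    rcases List.mem_cons.mp h with h | h
    · exact ⟨j, by simp [keysIdxFrom, h]⟩
    · obtain ⟨i, hi⟩ := @ih (j + 1) h
      exact ⟨i, by simp [keysIdxFrom]; right; exact hi⟩

-- A's scan is find? over the indexed key list
lemma aFindKey_eq_find? (r : Int) (c : List Int) : ∀ (j : Int) (ks : List (List Int)),
    aFindKey r c ks = ((keysIdxFrom j ks).find? (fun e => pvClose r c e.2)).map (·.2) := by
  intro j ks
  induction ks generalizing j with
  | nil => simp [aFindKey, keysIdxFrom]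
  | cons k ks ih =>
    simp only [aFindKey, keysIdxFrom, List.find?_cons]
    by_cases h : pvClose r c k = true
    · simp [h]
    · simp only [Bool.not_eq_true] at h; simp [h, ih (j + 1)]

-- minimality of find? over an indexed key list
lemma find?_keysIdxFrom_min {P : Int × List Int → Bool} {e0 : Int × List Int} :
    ∀ {j : Int} {ks : List (List Int)}, (keysIdxFrom j ks).find? P = some e0 →
    ∀ e ∈ keysIdxFrom j ks, P e = true → e0.1 ≤ e.1 := by
  intro j ks
  induction ks generalizing j with
  | nil => intro h; simp [keysIdxFrom] at h
  | cons k ks ih =>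
    intro hf e he hP
    simp only [keysIdxFrom, List.find?_cons] at hf he
    by_cases h : P (j, k) = true
    · simp only [h] at hf
      cases hf
      rcases List.mem_cons.mp he with he | he
      · subst he; simp
      · have := mem_keysIdxFrom_ge he; simp; omega
    · simp only [Bool.not_eq_true] at h
      simp only [h] at hf
      rcases List.mem_cons.mp he with he | he
      · exfalso; subst he; simp [h] at hP
      · exact ih hf e he hP

-- the running-minimum update, with the Bool guard split out
lemma bUpd_eq (r : Int) (c : List Int) (b : Option (Int × List Int)) (e : Int × List Int) :
    bUpd r c b e = if pvClose r c e.2 = true then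
      (match b with
       | none => some e
       | some x => if e.1 < x.1 then some e else some x)
    else b := by
  cases b with
  | none => by_cases h : pvClose r c e.2 = true <;> simp [bUpd, h]
  | some x =>
    by_cases h : pvClose r c e.2 = true <;> by_cases h2 : e.1 < x.1 <;>
      simp [bUpd, h, h2]

lemma foldMin_none_of {r : Int} {c : List Int} : ∀ (M : List (Int × List Int))
    (b : Option (Int × List Int)), (∀ e ∈ M, pvClose r c e.2 = false) →
    M.foldl (bUpd r c) b = b := by
  intro M
  induction M with
  | nil => intro b _; rfl
  | cons e M ih =>
    intro b hM
    have he : pvClose r c e.2 = false := hM e (by simp)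
    simp only [List.foldl_cons, bUpd_eq, he]
    simp only [Bool.false_eq_true, if_false]
    exact ih b (fun e' h' => hM e' (by simp [h']))

lemma foldMin_eq_none {r : Int} {c : List Int} : ∀ {M : List (Int × List Int)}
    {b : Option (Int × List Int)}, M.foldl (bUpd r c) b = none →
    b = none ∧ ∀ e ∈ M, pvClose r c e.2 = false := by
  intro M
  induction M with
  | nil => intro b h; simpa using h
  | cons e M ih =>
    intro b h
    simp only [List.foldl_cons] at h
    obtain ⟨hb', hM⟩ := ih h
    rw [bUpd_eq] at hb'
    by_cases he : pvClose r c e.2 = true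
    · rw [if_pos he] at hb'; cases b <;> simp at hb'
      · split at hb' <;> simp at hb'
    · simp only [Bool.not_eq_true] at he
      rw [if_neg (by simp [he])] at hb'
      exact ⟨hb', fun e' h' => by rcases List.mem_cons.mp h' with h' | h'
                                  · rw [h']; exact he
                                  · exact hM e' h'⟩

lemma foldMin_acc_le {r : Int} {c : List Int} {e1 x : Int × List Int} :
    ∀ {M : List (Int × List Int)}, M.foldl (bUpd r c) (some x) = some e1 → e1.1 ≤ x.1 := by
  intro M
  induction M generalizing x with
  | nil => intro h; cases h; simp
  | cons e M ih =>
    intro h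
    simp only [List.foldl_cons, bUpd_eq] at h
    split at h
    · split at h
      · have := ih h; simp at this; omega
      · next h2 => have := ih h; simp at this h2; omega
    · exact ih h

lemma foldMin_mem {r : Int} {c : List Int} {e1 : Int × List Int} :
    ∀ {M : List (Int × List Int)} {b : Option (Int × List Int)},
    M.foldl (bUpd r c) b = some e1 →
    (e1 ∈ M ∧ pvClose r c e1.2 = true) ∨ b = some e1 := by
  intro M
  induction M with
  | nil => intro b h; right; exact h
  | cons e M ih =>
    intro b h
    simp only [List.foldl_cons] at h
    rcases ih h with ⟨hm, hp⟩ | hb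
    · exact Or.inl ⟨List.mem_cons_of_mem _ hm, hp⟩
    · rw [bUpd_eq] at hb
      split at hb
      · next hp =>
        split at hb
        · cases hb; exact Or.inl ⟨by simp, hp⟩
        · next h2 =>
          split at hb
          · cases hb; exact Or.inl ⟨by simp, hp⟩
          · exact Or.inr hb
      · exact Or.inr hb

lemma foldMin_le {r : Int} {c : List Int} {e1 : Int × List Int} :
    ∀ {M : List (Int × List Int)} {b : Option (Int × List Int)},
    M.foldl (bUpd r c) b = some e1 →
    ∀ e ∈ M, pvClose r c e.2 = true → e1.1 ≤ e.1 := by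
  intro M
  induction M with
  | nil => intro b _ e he; simp at he
  | cons e M ih =>
    intro b h e' he' hp'
    simp only [List.foldl_cons] at h
    rcases List.mem_cons.mp he' with he' | he'
    · subst he'
      -- the new accumulator has index ≤ e'.1
      have hacc : ∀ y, bUpd r c b e' = some y → y.1 ≤ e'.1 := by
        intro y hy
        rw [bUpd_eq, if_pos hp'] at hy
        cases b with
        | none => cases hy; simp
        | some x =>
          simp only at hy
          split at hy <;> cases hy
          · simp
          · next h2 => simp at h2 ⊢; omega
      cases hb' : bUpd r c b e' with
      | none =>
        exfalso
        rw [bUpd_eq, if_pos hp'] at hb'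
        cases b with
        | none => simp at hb'
        | some x => simp only at hb'; split at hb' <;> simp at hb'
      | some y =>
        rw [hb'] at h
        have := foldMin_acc_le h
        have := hacc y hb'
        omega
    · exact ih h e' he' hp'

-- collapse nested for-loops into a fold over a flatMap
lemma foldl_foldl_flatMap {α β γ : Type} (g : α → List β) (f : γ → β → γ) :
    ∀ (xs : List α) (b : γ),
    xs.foldl (fun acc x => (g x).foldl f acc) b = (xs.flatMap g).foldl f b := by
  intro xs
  induction xs with
  | nil => intro b; rfl
  | cons x xs ih => intro b; simp [List.foldl_append, ih]

-- |a - b| ≤ r keeps floor-cells within distance 1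
lemma fdiv_close {r a b : Int} (hr : 0 ≤ r) (h : |a - b| ≤ r) :
    PySem.Int.floordiv b (r + 1) - 1 ≤ PySem.Int.floordiv a (r + 1) ∧
    PySem.Int.floordiv a (r + 1) ≤ PySem.Int.floordiv b (r + 1) + 1 := by
  rw [PySem.Int.floordiv_eq_ediv_of_pos (by omega), PySem.Int.floordiv_eq_ediv_of_pos (by omega)]
  rw [abs_le] at h
  constructor
  · have h1 : b - (r + 1) ≤ a := by omega
    have := Int.ediv_le_ediv (by omega : (0:Int) < r + 1) h1
    have h2 : (b - (r + 1)) / (r + 1) = b / (r + 1) - 1 := by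
      have := Int.add_mul_ediv_right b (-1) (by omega : r + 1 ≠ 0)
      simpa [sub_eq_add_neg, neg_mul] using this
    omega
  · have h1 : a ≤ b + (r + 1) := by omega
    have := Int.ediv_le_ediv (by omega : (0:Int) < r + 1) h1
    have h2 : (b + (r + 1)) / (r + 1) = b / (r + 1) + 1 := by
      simpa using Int.add_mul_ediv_right b 1 (by omega : r + 1 ≠ 0)
    omega

lemma pvClose_iff (r : Int) (c k : List Int) :
    pvClose r c k = true ↔
      |c.getD 0 0 - k.getD 0 0| ≤ r ∧ |c.getD 1 0 - k.getD 1 0| ≤ r ∧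
      |c.getD 2 0 - k.getD 2 0| ≤ r := by
  unfold pvClose
  rw [show List.range 3 = [0, 1, 2] from rfl]
  simp

lemma pvClose_self {r : Int} (hr : 0 ≤ r) (c : List Int) : pvClose r c c = true := by
  rw [pvClose_iff]
  simp [hr]


lemma pvClose_neg {r : Int} (hr : r < 0) (c k : List Int) : pvClose r c k = false := by
  rw [Bool.eq_false_iff]
  intro h
  rw [pvClose_iff] at h
  have := abs_nonneg (c.getD 0 0 - k.getD 0 0)
  omega

lemma aFindKey_neg {r : Int} (hr : r < 0) (c : List Int) (ks : List (List Int)) :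
    aFindKey r c ks = none := by
  induction ks with
  | nil => rfl
  | cons k ks ih => simp [aFindKey, pvClose_neg hr, ih]

-- simple facts about the association-list operations
lemma dictBump_fst (k : List Int) : ∀ (d : List (List Int × Int)),
    (dictBump d k).map Prod.fst = d.map Prod.fst := by
  intro d
  induction d with
  | nil => rfl
  | cons p d ih =>
    obtain ⟨k', v⟩ := p
    by_cases h : k' = k <;> simp [dictBump, h, ih]

lemma dictBump_length (k : List Int) : ∀ (d : List (List Int × Int)),
    (dictBump d k).length = d.length := by
  intro d
  induction d with
  | nil => rfl
  | cons p d ih =>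
    obtain ⟨k', v⟩ := p
    by_cases h : k' = k <;> simp [dictBump, h, ih]

lemma dictSet_of_not_mem {k : List Int} (v : Int) : ∀ {d : List (List Int × Int)},
    k ∉ d.map Prod.fst → dictSet d k v = d ++ [(k, v)] := by
  intro d
  induction d with
  | nil => intro _; rfl
  | cons p d ih =>
    obtain ⟨k', w⟩ := p
    intro h
    simp only [List.map_cons, List.mem_cons, not_or] at h
    simp only [dictSet]
    rw [if_neg (fun hh => h.1 hh.symm), ih h.2]
    rfl

-- invariant tying B's state to A's dictionary
def GInv (r m : Int)
    (s : PySem.Dict (Int × Int × Int) (List (Int × List Int)) × List (List Int × Int) × Int)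
    (d : List (List Int × Int)) : Prop :=
  s.2.1 = d ∧ s.2.2 = (d.length : Int) ∧
  ∀ cell, s.1.getD cell [] =
    (keysIdxFrom 0 (d.map Prod.fst)).filter (fun e => decide (cellOf m e.2 = cell))

-- the candidate scan of bStep, named, and its flatMap normal form
def bBest (r m : Int) (grid : PySem.Dict (Int × Int × Int) (List (Int × List Int)))
    (c : List Int) : Option (Int × List Int) :=
  bOffs.foldl (fun b1 dx => bOffs.foldl (fun b2 dy => bOffs.foldl (fun b3 dz =>
      (grid.getD ((cellOf m c).1 + dx, (cellOf m c).2.1 + dy, (cellOf m c).2.2 + dz) []).foldl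
        (bUpd r c) b3) b2) b1) none

def candOf (r m : Int) (grid : PySem.Dict (Int × Int × Int) (List (Int × List Int)))
    (c : List Int) : List (Int × List Int) :=
  bOffs.flatMap (fun dx => bOffs.flatMap (fun dy => bOffs.flatMap (fun dz =>
    grid.getD ((cellOf m c).1 + dx, (cellOf m c).2.1 + dy, (cellOf m c).2.2 + dz) [])))

lemma bBest_eq (r m : Int) (grid : PySem.Dict (Int × Int × Int) (List (Int × List Int)))
    (c : List Int) : bBest r m grid c = (candOf r m grid c).foldl (bUpd r c) none := by
  unfold bBest candOf
  simp only [foldl_foldl_flatMap]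

lemma bStep_eq (r m : Int) (grid : PySem.Dict (Int × Int × Int) (List (Int × List Int)))
    (g : List (List Int × Int)) (n : Int) (c : List Int) :
    bStep r m (grid, g, n) c =
      match bBest r m grid c with
      | some b => (grid, dictBump g b.2, n)
      | none => (grid.insert (cellOf m c) (grid.getD (cellOf m c) [] ++ [(n, c)]),
                 dictSet g c 1, n + 1) := rfl

lemma step_inv {r : Int} (hr : 0 ≤ r)
    (s : PySem.Dict (Int × Int × Int) (List (Int × List Int)) × List (List Int × Int) × Int)
    (d : List (List Int × Int)) (c : List Int) (h : GInv r (r + 1) s d) :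
    GInv r (r + 1) (bStep r (r + 1) s c) (aStepF r d c) := by
  obtain ⟨grid, g, n⟩ := s
  obtain ⟨h1, h2, h3⟩ := h
  simp only at h1 h2 h3
  subst h1 h2
  rw [bStep_eq, bBest_eq]
  -- every candidate is a genuine indexed key
  have hsub : ∀ e ∈ candOf r (r + 1) grid c, e ∈ keysIdxFrom 0 (g.map Prod.fst) := by
    intro e he
    unfold candOf at he
    simp only [List.mem_flatMap] at he
    obtain ⟨dx, _, dy, _, dz, _, hmem⟩ := he
    rw [h3] at hmem
    exact (List.mem_filter.mp hmem).1
  -- every matching indexed key is a candidate (the 27-cell coverage argument)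
  have hall : ∀ e ∈ keysIdxFrom 0 (g.map Prod.fst), pvClose r c e.2 = true →
      e ∈ candOf r (r + 1) grid c := by
    intro e he hp
    rw [pvClose_iff] at hp
    obtain ⟨hp0, hp1, hp2⟩ := hp
    rw [abs_sub_comm] at hp0 hp1 hp2
    have h0 := fdiv_close hr hp0
    have h1 := fdiv_close hr hp1
    have h2 := fdiv_close hr hp2
    unfold candOf
    simp only [List.mem_flatMap, cellOf]
    refine ⟨PySem.Int.floordiv (e.2.getD 0 0) (r + 1) - PySem.Int.floordiv (c.getD 0 0) (r + 1),
            by simp only [bOffs, List.mem_cons, List.not_mem_nil, or_false]; omega,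
            PySem.Int.floordiv (e.2.getD 1 0) (r + 1) - PySem.Int.floordiv (c.getD 1 0) (r + 1),
            by simp only [bOffs, List.mem_cons, List.not_mem_nil, or_false]; omega,
            PySem.Int.floordiv (e.2.getD 2 0) (r + 1) - PySem.Int.floordiv (c.getD 2 0) (r + 1),
            by simp only [bOffs, List.mem_cons, List.not_mem_nil, or_false]; omega, ?_⟩
    simp only [show ∀ x y : Int, x + (y - x) = y from fun x y => by ring]
    have hq : (PySem.Int.floordiv (e.2.getD 0 0) (r + 1),
        PySem.Int.floordiv (e.2.getD 1 0) (r + 1),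
        PySem.Int.floordiv (e.2.getD 2 0) (r + 1)) = cellOf (r + 1) e.2 := rfl
    rw [hq, h3]
    exact List.mem_filter.mpr ⟨he, by simp⟩
  -- case split on A's scan result
  cases hF : (keysIdxFrom 0 (g.map Prod.fst)).find? (fun e => pvClose r c e.2) with
  | none =>
    have hAF : aFindKey r c (g.map Prod.fst) = none := by
      rw [aFindKey_eq_find? r c 0, hF]; rfl
    have hbnone : (candOf r (r + 1) grid c).foldl (bUpd r c) none = none := by
      cases hres : (candOf r (r + 1) grid c).foldl (bUpd r c) none with
      | none => rfl
      | some e1 =>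
        exfalso
        rcases foldMin_mem hres with ⟨hm, hp⟩ | hb
        · exact absurd hp (by simpa using List.find?_eq_none.mp hF e1 (hsub e1 hm))
        · simp at hb
    rw [hbnone]
    unfold aStepF
    rw [hAF]
    simp only
    have hnotmem : c ∉ g.map Prod.fst := by
      intro hc
      obtain ⟨i, hi⟩ := exists_keysIdxFrom_of_mem (j := 0) hc
      have := List.find?_eq_none.mp hF _ hi
      exact absurd (pvClose_self hr c) (by simpa using this)
    rw [dictSet_of_not_mem 1 hnotmem]
    refine ⟨rfl, by simp, ?_⟩
    intro cell
    simp only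
    rw [PySem.Dict.getD_insert]
    have hmap : (g ++ [(c, 1)]).map Prod.fst = g.map Prod.fst ++ [c] := by simp
    rw [hmap, keysIdxFrom_append_singleton, List.filter_append]
    have hlen : ((0 : Int) + ((g.map Prod.fst).length : Int), c) = ((g.length : Int), c) := by
      simp
    rw [hlen]
    by_cases hc : cell = cellOf (r + 1) c
    · subst hc
      rw [if_pos rfl, h3]
      simp
    · rw [if_neg hc, h3]
      have hsing : List.filter (fun e => decide (cellOf (r + 1) e.2 = cell))
          [((g.length : Int), c)] = [] := by
        simp only [List.filter_cons, List.filter_nil]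
        rw [if_neg (by simpa using fun hh => hc hh.symm)]
      rw [hsing, List.append_nil]
  | some e0 =>
    have hAF : aFindKey r c (g.map Prod.fst) = some e0.2 := by
      rw [aFindKey_eq_find? r c 0, hF]; rfl
    have hp0 : pvClose r c e0.2 = true := by simpa using List.find?_some hF
    have hm0 : e0 ∈ keysIdxFrom 0 (g.map Prod.fst) := List.mem_of_find?_eq_some hF
    have hcand0 : e0 ∈ candOf r (r + 1) grid c := hall e0 hm0 hp0
    have hbsome : (candOf r (r + 1) grid c).foldl (bUpd r c) none = some e0 := by
      cases hres : (candOf r (r + 1) grid c).foldl (bUpd r c) none with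
      | none =>
        exfalso
        have := (foldMin_eq_none hres).2 e0 hcand0
        rw [hp0] at this
        cases this
      | some e1 =>
        rcases foldMin_mem hres with ⟨hm1, hp1⟩ | hb
        · have hle1 : e0.1 ≤ e1.1 := find?_keysIdxFrom_min hF e1 (hsub e1 hm1) hp1
          have hle2 : e1.1 ≤ e0.1 := foldMin_le hres e0 hcand0 hp0
          rw [keysIdxFrom_inj (hsub e1 hm1) hm0 (by omega)]
        · simp at hb
    rw [hbsome]
    unfold aStepF
    rw [hAF]
    simp only
    exact ⟨rfl, by rw [dictBump_length], fun cell => by rw [dictBump_fst]; exact h3 cell⟩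

lemma fold_eq_pos {r : Int} (hr : 0 ≤ r) : ∀ (colors : List (List Int))
    (s : PySem.Dict (Int × Int × Int) (List (Int × List Int)) × List (List Int × Int) × Int)
    (d : List (List Int × Int)), GInv r (r + 1) s d →
    (colors.foldl (bStep r (r + 1)) s).2.1 = colors.foldl (aStepF r) d := by
  intro colors
  induction colors with
  | nil => intro s d h; exact h.1
  | cons c colors ih =>
    intro s d h
    simp only [List.foldl_cons]
    exact ih _ _ (step_inv hr s d c h)

lemma bestNone_neg {r : Int} (hr : r < 0)
    (grid : PySem.Dict (Int × Int × Int) (List (Int × List Int))) (c : List Int) (cc : Int × Int × Int) :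
    bOffs.foldl (fun b1 dx => bOffs.foldl (fun b2 dy => bOffs.foldl (fun b3 dz =>
      (grid.getD (cc.1 + dx, cc.2.1 + dy, cc.2.2 + dz) []).foldl (bUpd r c) b3) b2) b1)
      none = none := by
  have hin : ∀ (L : List (Int × List Int)) (b : Option (Int × List Int)),
      L.foldl (bUpd r c) b = b :=
    fun L b => foldMin_none_of L b (fun e _ => pvClose_neg hr c e.2)
  simp only [hin, PySem.List.foldl_ignore]

lemma fold_eq_neg {r : Int} (hr : r < 0) : ∀ (colors : List (List Int))
    (s : PySem.Dict (Int × Int × Int) (List (Int × List Int)) × List (List Int × Int) × Int)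
    (d : List (List Int × Int)), s.2.1 = d →
    (colors.foldl (bStep r 1) s).2.1 = colors.foldl (aStepF r) d := by
  intro colors
  induction colors with
  | nil => intro s d h; exact h
  | cons c colors ih =>
    intro s d h
    simp only [List.foldl_cons]
    apply ih
    show (bStep r 1 s c).2.1 = aStepF r d c
    unfold bStep aStepF
    simp only [bestNone_neg hr, aFindKey_neg hr, h]

-- ===== VERDICT (by name: the statement is the Claim_ definition above) =====
theorem group_colors_by_range_spec : Claim_equal_group_colors_by_range := by
  intro colors r _hdom _hpre
  unfold Spec_group_colors_by_range group_colors_by_range_alt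
  rw [group_colors_eq_foldl]
  by_cases hr : 0 ≤ r
  · rw [if_pos hr]
    refine (fold_eq_pos hr colors _ [] ?_).symm
    refine ⟨rfl, rfl, fun cell => ?_⟩
    simp [keysIdxFrom, PySem.Dict.getD_empty]
  · rw [if_neg hr]
    exact (fold_eq_neg (by omega) colors _ [] rfl).symm
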